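-- pv_equiv track=rewrite | github.com/rashid-droi/sketch-and-guess | backend/engine/logic.py | mask_word
-- ===== SOURCE A (Python) =====
-- def mask_word(word: str, hints_revealed: int = 0) -> str:
--     """
--     Shows the first letter of every word and hides the rest.
--     Preserves spaces and punctuation.
--     """
--     if not word:
--         return ""
--
--     words = word.split(" ")
--     masked_words = []
--
--     for w in words:
--         if not w:
--             masked_words.append("")
--             continue
--
--         # First letter is always visible
--         m = w[0]
--         # Rest are underscores (preserving punctuation)
--         for char in w[1:]:
--             if char.isalnum():
--                 m += "_"
--             else:
--                 m += char
--         masked_words.append(m)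
--
--     return " ".join(masked_words)
-- ===== SOURCE B (Python) =====
-- def mask_word(word: str, hints_revealed: int = 0) -> str:
--     """Single stateful pass: keep the first char after each space boundary,
--     mask later alphanumerics with '_', preserve everything else."""
--     out = []
--     start = True
--     for ch in word:
--         if ch == ' ':
--             out.append(' ')
--             start = True
--         elif start:
--             out.append(ch)
--             start = False
--         else:
--             out.append('_' if ch.isalnum() else ch)
--     return ''.join(out)
-- ===== Notes on version B (the rewrite author's own statement) =====
-- stated objective: simpler
-- what changed: Replaces split(' ')/per-word inner loop/join with one stateful left-to-right scan using a boundary flag, no split or join of words.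
import Mathlib
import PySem

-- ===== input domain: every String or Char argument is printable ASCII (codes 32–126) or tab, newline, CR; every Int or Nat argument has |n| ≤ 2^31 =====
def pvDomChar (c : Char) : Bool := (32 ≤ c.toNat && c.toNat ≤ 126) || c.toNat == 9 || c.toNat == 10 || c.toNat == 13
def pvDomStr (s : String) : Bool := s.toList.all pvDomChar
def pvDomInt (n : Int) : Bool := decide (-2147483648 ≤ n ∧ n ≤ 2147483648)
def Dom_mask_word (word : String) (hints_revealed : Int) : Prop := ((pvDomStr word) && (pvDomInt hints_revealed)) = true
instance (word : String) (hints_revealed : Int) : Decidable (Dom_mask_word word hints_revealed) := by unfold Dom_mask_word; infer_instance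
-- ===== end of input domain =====

-- B replaces A's split(" ") / per-word masking loop / " ".join by a single stateful
-- left-to-right scan with a word-boundary flag (objective: simpler).

-- ===== PORT A =====
-- per-word masking: m = w[0]; then for char in w[1:] append '_' if alnum else char
def pvMaskOneA (w : List Char) : List Char :=
  match w with
  | [] => []
  | c :: rest =>
      (PySem.List.slice (c :: rest) (some 1) none).foldl
        (fun m ch => m ++ [if PySem.Chars.isalnum ch then '_' else ch]) [c]

def mask_word (word : String) (hints_revealed : Int) : String :=
  if word = "" then ""
  else
    let words := PySem.Chars.splitOn word.toList [' ']
    let masked_words := words.foldl (fun acc w => acc ++ [pvMaskOneA w]) []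
    String.mk (PySem.Chars.join [' '] masked_words)

-- ===== PORT B =====
def mask_word_alt (word : String) (hints_revealed : Int) : String :=
  String.mk
    (word.toList.foldl
      (fun (p : List Char × Bool) ch =>
        if ch = ' ' then (p.1 ++ [' '], true)
        else if p.2 then (p.1 ++ [ch], false)
        else (p.1 ++ [if PySem.Chars.isalnum ch then '_' else ch], false))
      ([], true)).1

-- ===== PRECONDITION & SPEC =====
def Spec_mask_word (word : String) (hints_revealed : Int) (out : String) : Prop := out = mask_word_alt word hints_revealed
instance (word : String) (hints_revealed : Int) (out : String) : Decidable (Spec_mask_word word hints_revealed out) := by unfold Spec_mask_word; infer_instance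

-- ===== CLAIM (what is proved, stated in full; the proofs are below) =====
def Claim_equal_mask_word : Prop := ∀ (word : String) (hints_revealed : Int), Dom_mask_word word hints_revealed → Spec_mask_word word hints_revealed (mask_word word hints_revealed)

-- ===== LEMMAS AND PROOFS =====

def pvMaskc (c : Char) : Char := if PySem.Chars.isalnum c then '_' else c

def pvMask1 : List Char → List Char
  | [] => []
  | c :: rest => c :: rest.map pvMaskc

def pvScan : List Char → Bool → List Char
  | [], _ => []
  | c :: cs, b =>
      if c = ' ' then ' ' :: pvScan cs true
      else if b then c :: pvScan cs false
      else pvMaskc c :: pvScan cs false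

def pvJoinW : List (List Char) → List Char
  | [] => []
  | [w] => w
  | w :: ws => w ++ ' ' :: pvJoinW ws

lemma pvFoldlMask (rest : List Char) (m : List Char) :
    rest.foldl (fun m ch => m ++ [if PySem.Chars.isalnum ch then '_' else ch]) m
      = m ++ rest.map pvMaskc := by
  induction rest generalizing m with
  | nil => simp
  | cons c cs ih => simp [List.foldl, ih, pvMaskc]

lemma pvMaskOneA_eq (w : List Char) : pvMaskOneA w = pvMask1 w := by
  cases w with
  | nil => rfl
  | cons c rest =>
      simp only [pvMaskOneA, pvMask1,
        PySem.List.slice_from (c :: rest) (a := 1) (by norm_num), pvFoldlMask]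
      simp

lemma pvFoldlSnoc (ws : List (List Char)) (acc : List (List Char)) :
    ws.foldl (fun acc w => acc ++ [pvMaskOneA w]) acc = acc ++ ws.map pvMaskOneA := by
  induction ws generalizing acc with
  | nil => simp
  | cons w ws ih => simp [List.foldl, ih]

lemma pvJoin_eq : ∀ (ws : List (List Char)), PySem.Chars.join [' '] ws = pvJoinW ws
  | [] => by simp [PySem.Chars.join, List.intercalate, pvJoinW]
  | [w] => by simp [PySem.Chars.join, List.intercalate, pvJoinW]
  | w :: v :: vs => by
      have ih := pvJoin_eq (v :: vs)
      simp only [PySem.Chars.join, List.intercalate] at ih ⊢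
      rw [List.intersperse_cons₂, List.flatten_cons, List.flatten_cons, ih]
      simp [pvJoinW]

lemma pvModifyHead_id (L : List (List Char)) : L.modifyHead (fun x => x) = L := by
  cases L <;> simp

set_option maxRecDepth 8192 in
lemma pvGo_spec (fuel : Nat) (l cur : List Char) (acc : List (List Char))
    (h : l.length < fuel) :
    PySem.Chars.splitOn.go [' '] fuel l cur acc
      = acc.reverse ++ (l.splitOnP (· == ' ')).modifyHead (fun x => cur.reverse ++ x) := by
  induction fuel generalizing l cur acc with
  | zero => omega
  | succ f ih =>
      cases l with
      | nil => simp [PySem.Chars.splitOn.go, List.splitOnP_nil]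
      | cons c rest =>
          by_cases hc : c = ' '
          · subst hc
            have hpre : [' '].isPrefixOf (' ' :: rest) = true := by
              simp [List.isPrefixOf]
            rw [PySem.Chars.splitOn.go]
            simp only [hpre, if_true]
            rw [ih _ _ _ (by simpa using Nat.lt_of_succ_lt_succ h)]
            rw [List.splitOnP_cons]
            simp only [beq_self_eq_true, if_true, List.reverse_cons, List.reverse_nil,
              List.nil_append, List.append_assoc]
            rw [pvModifyHead_id]
            rw [show List.drop [' '].length (' ' :: rest) = rest from rfl]
            rw [show List.modifyHead (fun x => cur.reverse ++ x)
                  ([] :: List.splitOnP (fun x => x == ' ') rest)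
                = (cur.reverse ++ []) :: List.splitOnP (fun x => x == ' ') rest from rfl]
            rw [List.append_nil, List.singleton_append]
          · have hb : (' ' == c) = false := by
              rw [beq_eq_false_iff_ne]
              exact fun h' => hc h'.symm
            have hpre : [' '].isPrefixOf (c :: rest) = false := by
              simp [List.isPrefixOf, hb]
            rw [PySem.Chars.splitOn.go]
            simp only [hpre, Bool.false_eq_true, if_false]
            rw [ih _ _ _ (by simpa using Nat.lt_of_succ_lt_succ h)]
            rw [List.splitOnP_cons]
            have hbeq : (c == ' ') = false := by simpa using hc
            simp only [hbeq, Bool.false_eq_true, if_false]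
            obtain ⟨w, ws, hws⟩ := List.exists_cons_of_ne_nil (List.splitOnP_ne_nil (· == ' ') rest)
            simp [hws, List.modifyHead]

lemma pvSplitOn_eq (cs : List Char) :
    PySem.Chars.splitOn cs [' '] = cs.splitOnP (· == ' ') := by
  rw [PySem.Chars.splitOn, pvGo_spec _ _ _ _ (by omega)]
  simp [pvModifyHead_id]

lemma pvJoinW_cons_head (x : Char) (t : List Char) (ws : List (List Char)) :
    pvJoinW ((x :: t) :: ws) = x :: pvJoinW (t :: ws) := by
  cases ws <;> simp [pvJoinW]

lemma pvKey (cs : List Char) (b : Bool) :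
    pvScan cs b
      = pvJoinW (match cs.splitOnP (· == ' ') with
          | [] => []
          | w :: ws => (if b then pvMask1 w else w.map pvMaskc) :: ws.map pvMask1) := by
  induction cs generalizing b with
  | nil =>
      cases b <;> simp [List.splitOnP_nil, pvScan, pvMask1, pvJoinW]
  | cons c cs ih =>
      obtain ⟨w, ws, hws⟩ := List.exists_cons_of_ne_nil (List.splitOnP_ne_nil (· == ' ') cs)
      by_cases hc : c = ' '
      · subst hc
        rw [List.splitOnP_cons]
        simp only [beq_self_eq_true, if_true]
        have : pvScan (' ' :: cs) b = ' ' :: pvScan cs true := by simp [pvScan]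
        rw [this, ih true, hws]
        cases b <;> simp [pvMask1, pvJoinW, List.map_cons]
      · rw [List.splitOnP_cons]
        have hbeq : (c == ' ') = false := by simpa using hc
        simp only [hbeq, Bool.false_eq_true, if_false, hws, List.modifyHead]
        have hscan : pvScan (c :: cs) b
            = (if b then c else pvMaskc c) :: pvScan cs false := by
          cases b <;> simp [pvScan, hc]
        rw [hscan, ih false, hws]
        cases b <;> simp [pvMask1, pvJoinW_cons_head]

lemma pvScanB (cs : List Char) (acc : List Char) (b : Bool) :
    (cs.foldl
      (fun (p : List Char × Bool) ch =>
        if ch = ' ' then (p.1 ++ [' '], true)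
        else if p.2 then (p.1 ++ [ch], false)
        else (p.1 ++ [if PySem.Chars.isalnum ch then '_' else ch], false))
      (acc, b)).1 = acc ++ pvScan cs b := by
  induction cs generalizing acc b with
  | nil => simp [pvScan]
  | cons c cs ih =>
      by_cases hc : c = ' '
      · subst hc; simp [List.foldl, pvScan, ih]
      · cases b <;> simp [List.foldl, pvScan, hc, ih, pvMaskc]

lemma pvAlt_eq (word : String) (h : Int) :
    mask_word_alt word h = String.mk (pvScan word.toList true) := by
  unfold mask_word_alt
  rw [pvScanB]
  rfl

-- ===== VERDICT (by name: the statement is the Claim_ definition above) =====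
theorem mask_word_spec : Claim_equal_mask_word := by
  intro word h _
  unfold Spec_mask_word
  rw [pvAlt_eq]
  by_cases hw : word = ""
  · subst hw; rfl
  · unfold mask_word
    simp only [hw, if_false]
    rw [pvFoldlSnoc, pvJoin_eq, pvSplitOn_eq, pvKey word.toList true]
    obtain ⟨w, ws, hws⟩ :=
      List.exists_cons_of_ne_nil (List.splitOnP_ne_nil (· == ' ') word.toList)
    simp [hws, List.map_cons, show pvMaskOneA = pvMask1 from funext pvMaskOneA_eq]
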